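-- pv_equiv track=rewrite | github.com/ZerberusAI/ZSBOM | depclass/enhancers/deps_dev_provider.py | _organize_links
-- ===== SOURCE A (Python) =====
-- from typing import Any, Dict, List, Optional, Set, Tuple
--
-- def _organize_links(
--     version_links: List[Dict[str, Any]], project_data: Dict[str, Any]
-- ) -> Dict[str, Optional[str]]:
--     """Organize links from version and project data into structured format."""
--     links: Dict[str, Optional[str]] = {
--         "homepage": None,
--         "documentation": None,
--         "source_repository": None,
--         "issue_tracker": None,
--         "origin": None,
--     }
--
--     # Process version links
--     for link in version_links:
--         label = link.get("label", "").upper()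
--         url = link.get("url", "")
--         if not url:
--             continue
--
--         if label == "HOMEPAGE":
--             links["homepage"] = url
--         elif label == "DOCUMENTATION":
--             links["documentation"] = url
--         elif label == "SOURCE_REPO":
--             links["source_repository"] = url
--         elif label == "ISSUE_TRACKER":
--             links["issue_tracker"] = url
--         elif label == "ORIGIN":
--             links["origin"] = url
--
--     # Fallback to project data if not found in version links
--     if not links["homepage"] and project_data.get("homepage"):
--         links["homepage"] = project_data["homepage"]
--
--     return links
-- ===== SOURCE B (Python) =====
-- def _organize_links(version_links, project_data):
--     """Organize links by scanning backwards once per field for its last usable link."""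
--     def _last(target):
--         for link in reversed(version_links):
--             url = link.get("url", "")
--             if url and link.get("label", "").upper() == target:
--                 return url
--         return None
--
--     links = {
--         "homepage": _last("HOMEPAGE"),
--         "documentation": _last("DOCUMENTATION"),
--         "source_repository": _last("SOURCE_REPO"),
--         "issue_tracker": _last("ISSUE_TRACKER"),
--         "origin": _last("ORIGIN"),
--     }
--     if not links["homepage"] and project_data.get("homepage"):
--         links["homepage"] = project_data["homepage"]
--     return links
-- ===== Notes on version B (the rewrite author's own statement) =====
-- stated objective: alternative
-- what changed: Replaces A's forward loop mutating a five-key dict via an if/elif chain with one backward scan per field (first usable match in reversed order, i.e. the last winner), building the result dict directly.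
import Mathlib
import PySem

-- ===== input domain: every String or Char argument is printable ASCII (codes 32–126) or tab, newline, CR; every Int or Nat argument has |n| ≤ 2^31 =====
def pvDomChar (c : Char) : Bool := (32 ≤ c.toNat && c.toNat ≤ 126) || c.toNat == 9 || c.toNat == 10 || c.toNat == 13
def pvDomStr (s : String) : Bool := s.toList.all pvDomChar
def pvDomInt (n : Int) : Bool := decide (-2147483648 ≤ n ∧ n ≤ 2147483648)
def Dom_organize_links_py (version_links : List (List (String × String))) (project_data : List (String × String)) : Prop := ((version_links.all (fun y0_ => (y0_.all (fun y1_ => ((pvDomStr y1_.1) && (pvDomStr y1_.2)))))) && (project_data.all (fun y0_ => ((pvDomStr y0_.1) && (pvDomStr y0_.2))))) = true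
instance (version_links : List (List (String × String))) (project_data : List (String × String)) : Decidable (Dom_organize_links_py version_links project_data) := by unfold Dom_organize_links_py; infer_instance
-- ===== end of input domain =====

-- B replaces A's forward loop over a mutable dict by one backward scan per field
-- (last usable link wins); objective: alternative decomposition, same behaviour.

-- ===== PORT A =====
-- the loop body: label/url extraction, skip on empty url, if/elif chain of dict assignments
def pvUpdA (d : PySem.Dict String (Option String)) (link : List (String × String)) : PySem.Dict String (Option String) :=
  let label := PySem.Str.upper ((PySem.Dict.mk link).getD "label" "")
  let url := (PySem.Dict.mk link).getD "url" ""
  if url = "" then d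
  else if label = "HOMEPAGE" then d.insert "homepage" (some url)
  else if label = "DOCUMENTATION" then d.insert "documentation" (some url)
  else if label = "SOURCE_REPO" then d.insert "source_repository" (some url)
  else if label = "ISSUE_TRACKER" then d.insert "issue_tracker" (some url)
  else if label = "ORIGIN" then d.insert "origin" (some url)
  else d

def organize_links_py (version_links : List (List (String × String))) (project_data : List (String × String)) : List (String × Option String) :=
  let links0 : PySem.Dict String (Option String) :=
    PySem.Dict.mk [("homepage", none), ("documentation", none),
                   ("source_repository", none), ("issue_tracker", none), ("origin", none)]
  let links := version_links.foldl pvUpdA links0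
  -- fallback: `if not links["homepage"] and project_data.get("homepage"):`
  let links :=
    if (links.getD "homepage" none).getD "" = "" ∧
       ((PySem.Dict.mk project_data).get? "homepage").getD "" ≠ "" then
      links.insert "homepage" (some ((PySem.Dict.mk project_data).getD "homepage" ""))
    else links
  links.items

-- ===== PORT B =====
-- `_last(target)`: scan reversed(version_links), return the first link whose url is
-- nonempty and whose upper-cased label equals target
def pvLastB (version_links : List (List (String × String))) (target : String) : Option String :=
  version_links.reverse.findSome? (fun link =>
    let url := (PySem.Dict.mk link).getD "url" ""
    if url ≠ "" ∧ PySem.Str.upper ((PySem.Dict.mk link).getD "label" "") = target then some url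
    else none)

def organize_links_py_alt (version_links : List (List (String × String))) (project_data : List (String × String)) : List (String × Option String) :=
  let home := pvLastB version_links "HOMEPAGE"
  let home :=
    if home.getD "" = "" ∧ ((PySem.Dict.mk project_data).get? "homepage").getD "" ≠ "" then
      some ((PySem.Dict.mk project_data).getD "homepage" "")
    else home
  [("homepage", home),
   ("documentation", pvLastB version_links "DOCUMENTATION"),
   ("source_repository", pvLastB version_links "SOURCE_REPO"),
   ("issue_tracker", pvLastB version_links "ISSUE_TRACKER"),
   ("origin", pvLastB version_links "ORIGIN")]

-- ===== PRECONDITION & SPEC =====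
def Spec_organize_links_py (version_links : List (List (String × String))) (project_data : List (String × String)) (out : List (String × Option String)) : Prop := out = organize_links_py_alt version_links project_data
instance (version_links : List (List (String × String))) (project_data : List (String × String)) (out : List (String × Option String)) : Decidable (Spec_organize_links_py version_links project_data out) := by unfold Spec_organize_links_py; infer_instance

-- ===== CLAIM (what is proved, stated in full; the proofs are below) =====
def Claim_equal_organize_links_py : Prop := ∀ (version_links : List (List (String × String))) (project_data : List (String × String)), Dom_organize_links_py version_links project_data → Spec_organize_links_py version_links project_data (organize_links_py version_links project_data)

-- ===== LEMMAS AND PROOFS =====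

-- "last match else fallback": B's scan value with an explicit fallback for the induction
def pvPick (ls : List (List (String × String))) (t : String) (v : Option String) : Option String :=
  (pvLastB ls t).elim v some

theorem pvPick_nil (t : String) (v : Option String) : pvPick [] t v = v := rfl

theorem pvPick_cons (l : List (String × String)) (ls : List (List (String × String))) (t : String) (v : Option String) :
    pvPick (l :: ls) t v =
      pvPick ls t
        (if (PySem.Dict.mk l).getD "url" "" ≠ "" ∧
            PySem.Str.upper ((PySem.Dict.mk l).getD "label" "") = t
         then some ((PySem.Dict.mk l).getD "url" "") else v) := by
  simp only [pvPick, pvLastB, List.reverse_cons, List.findSome?_append]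
  split_ifs with h
  · cases hf : (ls.reverse.findSome? _) <;> simp [List.findSome?, h, Option.elim]
  · cases hf : (ls.reverse.findSome? _) <;> simp [List.findSome?, h, Option.elim]

-- the five-field state of A's loop, as a literal dict
def pvMkD (h d s i o : Option String) : PySem.Dict String (Option String) :=
  PySem.Dict.mk [("homepage", h), ("documentation", d),
                 ("source_repository", s), ("issue_tracker", i), ("origin", o)]

theorem pvLoop_eq (ls : List (List (String × String))) (h d s i o : Option String) :
    ls.foldl pvUpdA (pvMkD h d s i o) =
      pvMkD (pvPick ls "HOMEPAGE" h) (pvPick ls "DOCUMENTATION" d)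
            (pvPick ls "SOURCE_REPO" s) (pvPick ls "ISSUE_TRACKER" i) (pvPick ls "ORIGIN" o) := by
  induction ls generalizing h d s i o with
  | nil => simp [pvPick_nil]
  | cons l ls ih =>
    rw [List.foldl_cons, pvPick_cons, pvPick_cons, pvPick_cons, pvPick_cons, pvPick_cons]
    have hupd : ∀ h d s i o, pvUpdA (pvMkD h d s i o) l =
        pvMkD (if (PySem.Dict.mk l).getD "url" "" ≠ "" ∧ PySem.Str.upper ((PySem.Dict.mk l).getD "label" "") = "HOMEPAGE" then some ((PySem.Dict.mk l).getD "url" "") else h)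
              (if (PySem.Dict.mk l).getD "url" "" ≠ "" ∧ PySem.Str.upper ((PySem.Dict.mk l).getD "label" "") = "DOCUMENTATION" then some ((PySem.Dict.mk l).getD "url" "") else d)
              (if (PySem.Dict.mk l).getD "url" "" ≠ "" ∧ PySem.Str.upper ((PySem.Dict.mk l).getD "label" "") = "SOURCE_REPO" then some ((PySem.Dict.mk l).getD "url" "") else s)
              (if (PySem.Dict.mk l).getD "url" "" ≠ "" ∧ PySem.Str.upper ((PySem.Dict.mk l).getD "label" "") = "ISSUE_TRACKER" then some ((PySem.Dict.mk l).getD "url" "") else i)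
              (if (PySem.Dict.mk l).getD "url" "" ≠ "" ∧ PySem.Str.upper ((PySem.Dict.mk l).getD "label" "") = "ORIGIN" then some ((PySem.Dict.mk l).getD "url" "") else o) := by
      intro h d s i o
      simp only [pvUpdA, pvMkD]
      split_ifs <;> simp_all [PySem.Dict.insert, PySem.Dict.contains]
    rw [hupd, ih]

-- ===== VERDICT (by name: the statement is the Claim_ definition above) =====
theorem organize_links_py_spec : Claim_equal_organize_links_py := by
  intro vl pd _
  show organize_links_py vl pd = organize_links_py_alt vl pd
  simp only [organize_links_py, organize_links_py_alt]
  have h0 : PySem.Dict.mk [("homepage", (none : Option String)), ("documentation", none),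
      ("source_repository", none), ("issue_tracker", none), ("origin", none)] =
      pvMkD none none none none none := rfl
  rw [h0, pvLoop_eq]
  have hp : ∀ t, pvPick vl t none = pvLastB vl t := by
    intro t; simp [pvPick, Option.elim]; cases pvLastB vl t <;> simp
  simp only [pvMkD]
  split_ifs with hc hc' hc' <;>
    simp_all [PySem.Dict.getD, PySem.Dict.get?, PySem.Dict.insert, PySem.Dict.contains]
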